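-- pv_equiv track=rewrite | github.com/Digital-Physics/algorithms | photography_search.py | getArtisticPhotographCount2
-- ===== SOURCE A (Python) =====
-- def getArtisticPhotographCount2(N: int, C: str, X: int, Y: int) -> int:
--     def one_way(n_s: int, c_s: str, x_s: int, y_s: int) -> int:
--         count = 0
--
--         for p_idx in range(n_s):
--             if c_s[p_idx] == "P":
--                 for a_idx in range(p_idx + x_s, p_idx + y_s + 1):
--                     if a_idx < n_s and c_s[a_idx] == "A":
--                         for b_idx in range(a_idx + x_s, a_idx + y_s + 1):
--                             if b_idx < n_s and c_s[b_idx] == "B":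
--                                 count += 1
--
--         return count
--
--     #reverse = C[::-1]
--     reverse = list(reversed(C))
--     return one_way(N, C, X, Y) + one_way(N, reverse, X, Y)
-- ===== SOURCE B (Python) =====
-- def getArtisticPhotographCount2(N: int, C: str, X: int, Y: int) -> int:
--     # For each 'A' at index a, multiply the number of 'P's in the window
--     # [a-Y, a-X] by the number of 'B's in [a+X, a+Y] (and symmetrically for
--     # B...A...P via the reversed string), instead of A's triple nested scan.
--     def window_count(s: str, ch: str, lo: int, hi: int, n: int) -> int:
--         return sum(1 for i in range(max(lo, 0), min(hi, n - 1) + 1) if s[i] == ch)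
--
--     def one_sided(n: int, s: str, x: int, y: int) -> int:
--         total = 0
--         for a in range(n):
--             if s[a] == "A":
--                 total += window_count(s, "P", a - y, a - x, n) * window_count(s, "B", a + x, a + y, n)
--         return total
--
--     return one_sided(N, C, X, Y) + one_sided(N, C[::-1], X, Y)
-- ===== Notes on version B (the rewrite author's own statement) =====
-- stated objective: alternative
-- what changed: Instead of scanning, for every P, each candidate A position and then each candidate B position (a triple nested loop), B makes a single pass over positions and, at each 'A', multiplies the count of 'P' in its left gap window by the count of 'B' in its right gap window (and symmetrically via the reversed string); this trades the nested (P,A,B) enumeration for two clamped window counts per position.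
-- outside the precondition, e.g. on getArtisticPhotographCount2(3, 'APB', -1, 0): A returns 1, B returns 0
import Mathlib
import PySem

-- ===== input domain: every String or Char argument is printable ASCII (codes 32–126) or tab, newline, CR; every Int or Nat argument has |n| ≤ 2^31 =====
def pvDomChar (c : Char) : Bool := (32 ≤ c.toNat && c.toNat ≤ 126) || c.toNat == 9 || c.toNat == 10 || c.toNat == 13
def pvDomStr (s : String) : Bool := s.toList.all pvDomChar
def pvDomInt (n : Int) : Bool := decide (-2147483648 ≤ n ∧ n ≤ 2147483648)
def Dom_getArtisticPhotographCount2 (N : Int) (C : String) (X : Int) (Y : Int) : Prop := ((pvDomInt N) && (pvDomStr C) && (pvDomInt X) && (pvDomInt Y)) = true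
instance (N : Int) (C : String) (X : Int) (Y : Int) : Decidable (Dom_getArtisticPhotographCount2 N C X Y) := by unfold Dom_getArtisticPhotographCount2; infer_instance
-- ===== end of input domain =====

-- B replaces A's triple nested scan by, for each 'A', the product of the count of 'P' in its
-- left gap window and the count of 'B' in its right gap window (both directions via the
-- reversed string): one window scan per position instead of a window scan per (P,A) pair.


-- ===== PORT A =====
def pvOneWayA (n : Int) (cs : List Char) (x y : Int) : Int :=
  (PySem.List.pyRange 0 n).foldl (fun count pIdx =>
    if PySem.List.pyGetD cs pIdx ' ' = 'P' then
      (PySem.List.pyRange (pIdx + x) (pIdx + y + 1)).foldl (fun c aIdx =>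
        if aIdx < n ∧ PySem.List.pyGetD cs aIdx ' ' = 'A' then
          (PySem.List.pyRange (aIdx + x) (aIdx + y + 1)).foldl (fun c2 bIdx =>
            if bIdx < n ∧ PySem.List.pyGetD cs bIdx ' ' = 'B' then c2 + 1 else c2) c
        else c) count
    else count) 0

def getArtisticPhotographCount2 (N : Int) (C : String) (X : Int) (Y : Int) : Int :=
  pvOneWayA N C.toList X Y + pvOneWayA N C.toList.reverse X Y

-- ===== PORT B =====
def pvWindowCount (s : List Char) (ch : Char) (lo hi n : Int) : Int :=
  ((PySem.List.pyRange (max lo 0) (min hi (n - 1) + 1)).map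
    (fun i => if PySem.List.pyGetD s i ' ' = ch then (1 : Int) else 0)).sum

def pvOneSided (n : Int) (s : List Char) (x y : Int) : Int :=
  (PySem.List.pyRange 0 n).foldl (fun total a =>
    if PySem.List.pyGetD s a ' ' = 'A' then
      total + pvWindowCount s 'P' (a - y) (a - x) n * pvWindowCount s 'B' (a + x) (a + y) n
    else total) 0

def getArtisticPhotographCount2_alt (N : Int) (C : String) (X : Int) (Y : Int) : Int :=
  pvOneSided N C.toList X Y + pvOneSided N C.toList.reverse X Y

-- ===== PRECONDITION & SPEC =====
-- Pre_ excludes N > len(C), on which A raises IndexError, and negative gap bounds with a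
-- nonempty gap window (X < 0 with X ≤ Y and 0 < N), on which A either raises IndexError or
-- reads characters through Python's negative-index wraparound — malformed gap bounds
-- outside the problem's natural domain (the puzzle requires 1 ≤ X ≤ Y).
def Pre_getArtisticPhotographCount2 (N : Int) (C : String) (X : Int) (Y : Int) : Prop :=
  N ≤ (C.toList.length : Int) ∧ (0 ≤ X ∨ Y < X ∨ N ≤ 0)
instance (N : Int) (C : String) (X : Int) (Y : Int) : Decidable (Pre_getArtisticPhotographCount2 N C X Y) := by unfold Pre_getArtisticPhotographCount2; infer_instance
def pvWitness_getArtisticPhotographCount2 : Int × String × Int × Int := (3, "PAB", 1, 1)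

def Spec_getArtisticPhotographCount2 (N : Int) (C : String) (X : Int) (Y : Int) (out : Int) : Prop := out = getArtisticPhotographCount2_alt N C X Y
instance (N : Int) (C : String) (X : Int) (Y : Int) (out : Int) : Decidable (Spec_getArtisticPhotographCount2 N C X Y out) := by unfold Spec_getArtisticPhotographCount2; infer_instance

-- ===== CLAIM (what is proved, stated in full; the proofs are below) =====
def Claim_equal_getArtisticPhotographCount2 : Prop := ∀ (N : Int) (C : String) (X : Int) (Y : Int), Dom_getArtisticPhotographCount2 N C X Y → Pre_getArtisticPhotographCount2 N C X Y → Spec_getArtisticPhotographCount2 N C X Y (getArtisticPhotographCount2 N C X Y)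

-- ===== LEMMAS AND PROOFS =====

lemma pvSumIcc (g : Int → Int) (l h : Int) :
    ((PySem.List.pyRange l h).map g).sum = ∑ i ∈ Finset.Icc l (h - 1), g i := by
  obtain ⟨m, hm⟩ : ∃ m : Nat, (h - l).toNat = m := ⟨_, rfl⟩
  induction m generalizing l with
  | zero =>
      rw [PySem.List.pyRange_one_eq_nil (by omega), Finset.Icc_eq_empty (by omega)]
      simp
  | succ m ih =>
      have hl : l < h := by omega
      rw [PySem.List.pyRange_one_cons hl, List.map_cons, List.sum_cons,
          ih (l + 1) (by omega),
          show Finset.Icc l (h - 1) = insert l (Finset.Icc (l + 1) (h - 1)) from by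
            ext i; simp; omega,
          Finset.sum_insert (by simp)]

lemma pvFoldIte (q : Int → Prop) [DecidablePred q] (g : Int → Int) (l h init : Int) :
    (PySem.List.pyRange l h).foldl (fun c i => if q i then c + g i else c) init
      = init + ∑ i ∈ Finset.Icc l (h - 1), if q i then g i else 0 := by
  have he : (fun (c i : Int) => if q i then c + g i else c)
      = fun c i => c + if q i then g i else 0 := by
    funext c i; split <;> simp
  rw [he, PySem.List.foldl_add, pvSumIcc]

noncomputable def pvI (n : Int) : Finset Int := Finset.Icc 0 (n - 1)

lemma pvOneWay_sum (n : Int) (cs : List Char) (x y : Int) :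
    pvOneWayA n cs x y
      = ∑ p ∈ pvI n, (if PySem.List.pyGetD cs p ' ' = 'P' then
          (∑ a ∈ Finset.Icc (p + x) (p + y), if a < n ∧ PySem.List.pyGetD cs a ' ' = 'A' then
            (∑ b ∈ Finset.Icc (a + x) (a + y),
              if b < n ∧ PySem.List.pyGetD cs b ' ' = 'B' then (1 : Int) else 0)
          else 0)
        else 0) := by
  unfold pvOneWayA pvI
  simp only [pvFoldIte]
  simp only [add_sub_cancel_right, zero_add]

lemma pvOneSided_sum (n : Int) (s : List Char) (x y : Int) :
    pvOneSided n s x y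
      = ∑ a ∈ pvI n, (if PySem.List.pyGetD s a ' ' = 'A' then
          pvWindowCount s 'P' (a - y) (a - x) n * pvWindowCount s 'B' (a + x) (a + y) n
        else 0) := by
  unfold pvOneSided pvI
  simp only [pvFoldIte]
  simp only [zero_add]

lemma pvWindowCount_sum (s : List Char) (ch : Char) (lo hi n : Int) :
    pvWindowCount s ch lo hi n
      = ∑ i ∈ pvI n, (if lo ≤ i ∧ i ≤ hi then
          (if PySem.List.pyGetD s i ' ' = ch then (1 : Int) else 0) else 0) := by
  unfold pvWindowCount pvI
  rw [pvSumIcc, add_sub_cancel_right,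
      show Finset.Icc (max lo 0) (min hi (n - 1))
          = (Finset.Icc 0 (n - 1)).filter (fun i => lo ≤ i ∧ i ≤ hi) from by
        ext i; simp; omega,
      Finset.sum_filter]

lemma pvWinToI (g : Int → Int) (n lo hi : Int) (hlo : 0 ≤ lo)
    (hv : ∀ a, n ≤ a → g a = 0) :
    ∑ a ∈ Finset.Icc lo hi, g a = ∑ a ∈ pvI n, if lo ≤ a ∧ a ≤ hi then g a else 0 := by
  rw [← Finset.sum_filter,
      show (pvI n).filter (fun a => lo ≤ a ∧ a ≤ hi)
          = (Finset.Icc lo hi).filter (fun a => a < n) from by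
        ext i; simp [pvI]; omega,
      Finset.sum_filter_of_ne (fun a _ hne => by
        by_contra h
        exact hne (hv a (by omega)))]

lemma pvMemI {n i : Int} (h : i ∈ pvI n) : 0 ≤ i ∧ i < n := by
  simp [pvI] at h; omega

theorem pvMain (n : Int) (cs : List Char) (x y : Int)
    (hxy : 0 ≤ x ∨ y < x ∨ n ≤ 0) :
    pvOneWayA n cs x y = pvOneSided n cs x y := by
  rw [pvOneWay_sum, pvOneSided_sum]
  by_cases hn : n ≤ 0
  · unfold pvI
    rw [Finset.Icc_eq_empty (by omega)]
    simp
  by_cases hyx : y < x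
  · trans (0 : Int)
    · apply Finset.sum_eq_zero; intro p _
      rw [Finset.Icc_eq_empty (by omega), Finset.sum_empty, ite_self]
    · symm
      apply Finset.sum_eq_zero; intro a _
      rw [pvWindowCount_sum,
          Finset.sum_eq_zero (fun i _ => by rw [if_neg (by omega)])]
      simp
  have hx : 0 ≤ x := by omega
  calc
    ∑ p ∈ pvI n, (if PySem.List.pyGetD cs p ' ' = 'P' then
        (∑ a ∈ Finset.Icc (p + x) (p + y), if a < n ∧ PySem.List.pyGetD cs a ' ' = 'A' then
          (∑ b ∈ Finset.Icc (a + x) (a + y),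
            if b < n ∧ PySem.List.pyGetD cs b ' ' = 'B' then (1 : Int) else 0)
        else 0)
      else 0)
      = ∑ p ∈ pvI n, (if PySem.List.pyGetD cs p ' ' = 'P' then
          (∑ a ∈ pvI n, if p + x ≤ a ∧ a ≤ p + y then
            (if PySem.List.pyGetD cs a ' ' = 'A' then
              (∑ b ∈ pvI n, if a + x ≤ b ∧ b ≤ a + y then
                (if PySem.List.pyGetD cs b ' ' = 'B' then (1 : Int) else 0) else 0)
            else 0)
          else 0)
        else 0) := by
        apply Finset.sum_congr rfl; intro p hp
        by_cases hP : PySem.List.pyGetD cs p ' ' = 'P'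
        · rw [if_pos hP, if_pos hP,
              pvWinToI _ n _ _ (by have := pvMemI hp; omega)
                (fun a ha => by rw [if_neg (by omega)])]
          apply Finset.sum_congr rfl; intro a ha
          by_cases hwin : p + x ≤ a ∧ a ≤ p + y
          · rw [if_pos hwin, if_pos hwin]
            by_cases hA : PySem.List.pyGetD cs a ' ' = 'A'
            · rw [if_pos ⟨(pvMemI ha).2, hA⟩, if_pos hA,
                  pvWinToI _ n _ _ (by have := pvMemI ha; omega)
                    (fun b hb => by rw [if_neg (by omega)])]
              apply Finset.sum_congr rfl; intro b hb
              simp [(pvMemI hb).2]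
            · rw [if_neg (by tauto), if_neg hA]
          · rw [if_neg hwin, if_neg hwin]
        · rw [if_neg hP, if_neg hP]
    _ = ∑ p ∈ pvI n, ∑ a ∈ pvI n, (if PySem.List.pyGetD cs p ' ' = 'P' then
          (if p + x ≤ a ∧ a ≤ p + y then
            (if PySem.List.pyGetD cs a ' ' = 'A' then
              (∑ b ∈ pvI n, if a + x ≤ b ∧ b ≤ a + y then
                (if PySem.List.pyGetD cs b ' ' = 'B' then (1 : Int) else 0) else 0)
            else 0)
          else 0)
        else 0) := by
        apply Finset.sum_congr rfl; intro p _
        by_cases hP : PySem.List.pyGetD cs p ' ' = 'P'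
        · simp only [if_pos hP]
        · simp only [if_neg hP, Finset.sum_const_zero]
    _ = ∑ a ∈ pvI n, ∑ p ∈ pvI n, (if PySem.List.pyGetD cs p ' ' = 'P' then
          (if p + x ≤ a ∧ a ≤ p + y then
            (if PySem.List.pyGetD cs a ' ' = 'A' then
              (∑ b ∈ pvI n, if a + x ≤ b ∧ b ≤ a + y then
                (if PySem.List.pyGetD cs b ' ' = 'B' then (1 : Int) else 0) else 0)
            else 0)
          else 0)
        else 0) := Finset.sum_comm
    _ = ∑ a ∈ pvI n, (if PySem.List.pyGetD cs a ' ' = 'A' then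
          pvWindowCount cs 'P' (a - y) (a - x) n * pvWindowCount cs 'B' (a + x) (a + y) n
        else 0) := by
        apply Finset.sum_congr rfl; intro a _
        by_cases hA : PySem.List.pyGetD cs a ' ' = 'A'
        · simp only [if_pos hA, pvWindowCount_sum]
          rw [Finset.sum_mul]
          apply Finset.sum_congr rfl; intro p _
          split_ifs <;> first | (exfalso; omega) | ring
        · simp only [if_neg hA, ite_self]
          simp

-- ===== VERDICT (by name: the statement is the Claim_ definition above) =====
theorem getArtisticPhotographCount2_spec : Claim_equal_getArtisticPhotographCount2 := by
  intro N C X Y _ hpre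
  unfold Spec_getArtisticPhotographCount2 getArtisticPhotographCount2 getArtisticPhotographCount2_alt
  rw [pvMain N C.toList X Y hpre.2, pvMain N C.toList.reverse X Y hpre.2]
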